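-- pv_equiv track=rewrite | github.com/agryman/sean | galois-2020/question-3.py | is_rad_pair
-- ===== SOURCE A (Python) =====
-- def is_rad_pair(a: int, b: int) -> bool:
--     """Return True if and only if the pair (a, b) is a RadPair."""
--
--     assert type(a) == int
--     assert type(b) == int
--
--     assert 1 <= a <= b <= 9
--
--     ab = a * b
--     ones_digit_ab = ab % 10
--     tens_digit_ab = ab // 10
--
--     d_exists: bool = False
--     for d in range(1, 10):
--         p = (a + d) * (b + d)
--         ones_digit_p = p % 10
--         tens_digit_p = p // 10
--
--         d_exists = \
--             p <= 99 and \
--             ones_digit_p == d + ones_digit_ab and \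
--             tens_digit_p == d + tens_digit_ab
--
--         if d_exists:
--             break
--
--     return d_exists
-- ===== SOURCE B (Python) =====
-- def is_rad_pair(a: int, b: int) -> bool:
--     """Return True if and only if the pair (a, b) is a RadPair."""
--     assert type(a) == int
--     assert type(b) == int
--     assert 1 <= a <= b <= 9
--     # A matching d must satisfy a + b + d = 11, so test the single candidate.
--     d = 11 - a - b
--     if not 1 <= d <= 9:
--         return False
--     ab = a * b
--     p = (a + d) * (b + d)
--     return p <= 99 and p % 10 == d + ab % 10 and p // 10 == d + ab // 10
-- ===== Notes on version B (the rewrite author's own statement) =====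
-- stated objective: simpler
-- what changed: Replaces the search over d in 1..9 by the unique closed-form candidate d = 11 - a - b (a match algebraically forces a+b+d = 11), checking the same digit conditions once.
import Mathlib
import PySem

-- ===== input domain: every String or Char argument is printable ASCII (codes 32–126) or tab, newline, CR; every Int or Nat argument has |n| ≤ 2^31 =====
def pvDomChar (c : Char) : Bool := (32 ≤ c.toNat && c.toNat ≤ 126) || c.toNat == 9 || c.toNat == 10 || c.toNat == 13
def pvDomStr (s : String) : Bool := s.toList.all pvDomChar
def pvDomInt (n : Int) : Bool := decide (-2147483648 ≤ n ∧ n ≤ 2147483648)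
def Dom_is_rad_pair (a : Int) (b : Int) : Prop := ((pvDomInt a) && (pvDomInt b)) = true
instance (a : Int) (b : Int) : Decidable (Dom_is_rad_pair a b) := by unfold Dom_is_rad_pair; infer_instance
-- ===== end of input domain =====

-- B replaces A's search over d = 1..9 by the unique closed-form candidate d = 11 - a - b (simpler).

-- ===== PORT A =====
-- the `for d in range(1, 10)` loop with early break; returns the last computed d_exists
def isRadPairLoop (a : Int) (b : Int) (ab : Int) : List Int → Bool
  | [] => false
  | d :: rest =>
    let p := (a + d) * (b + d)
    let onesP := PySem.Int.mod p 10
    let tensP := PySem.Int.floordiv p 10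
    let dExists := decide (p ≤ 99) &&
      decide (onesP = d + PySem.Int.mod ab 10) &&
      decide (tensP = d + PySem.Int.floordiv ab 10)
    if dExists then dExists else isRadPairLoop a b ab rest

def is_rad_pair (a : Int) (b : Int) : Bool :=
  let ab := a * b
  isRadPairLoop a b ab (PySem.List.pyRange 1 10 1)

-- ===== PORT B =====
def is_rad_pair_alt (a : Int) (b : Int) : Bool :=
  let d := 11 - a - b
  if decide (1 ≤ d ∧ d ≤ 9) then
    let ab := a * b
    let p := (a + d) * (b + d)
    decide (p ≤ 99) &&
      decide (PySem.Int.mod p 10 = d + PySem.Int.mod ab 10) &&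
      decide (PySem.Int.floordiv p 10 = d + PySem.Int.floordiv ab 10)
  else false

-- ===== PRECONDITION & SPEC =====
-- A's asserts raise AssertionError unless 1 <= a <= b <= 9
def Pre_is_rad_pair (a : Int) (b : Int) : Prop := 1 ≤ a ∧ a ≤ b ∧ b ≤ 9
instance (a : Int) (b : Int) : Decidable (Pre_is_rad_pair a b) := by unfold Pre_is_rad_pair; infer_instance
def pvWitness_is_rad_pair : Int × Int := (2, 5)

def Spec_is_rad_pair (a : Int) (b : Int) (out : Bool) : Prop := out = is_rad_pair_alt a b
instance (a : Int) (b : Int) (out : Bool) : Decidable (Spec_is_rad_pair a b out) := by unfold Spec_is_rad_pair; infer_instance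

-- ===== CLAIM (what is proved, stated in full; the proofs are below) =====
def Claim_equal_is_rad_pair : Prop := ∀ (a : Int) (b : Int), Dom_is_rad_pair a b → Pre_is_rad_pair a b → Spec_is_rad_pair a b (is_rad_pair a b)

-- ===== LEMMAS AND PROOFS =====

-- ===== VERDICT (by name: the statement is the Claim_ definition above) =====
theorem is_rad_pair_spec : Claim_equal_is_rad_pair := by
  intro a b _ hp
  obtain ⟨h1, h2, h3⟩ := hp
  unfold Spec_is_rad_pair
  have ha9 : a ≤ 9 := le_trans h2 h3
  have hb1 : 1 ≤ b := le_trans h1 h2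
  interval_cases a <;> interval_cases b <;> decide
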